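-- pv_equiv track=rewrite | github.com/awslabs/nki-autotune | nkigym/src/nkigym/schedule/enumerate.py | _valid_pass_order
-- ===== SOURCE A (Python) =====
-- def _valid_pass_order(perm: tuple[tuple[str, int], ...]) -> bool:
--     """Check that same-dim passes maintain ascending pass_index order.
--
--     Args:
--         perm: A permutation of items.
--
--     Returns:
--         True if pass ordering constraint is satisfied.
--     """
--     last_pass: dict[str, int] = {}
--     ok = True
--     for d, p in perm:
--         if d in last_pass:
--             ok = ok and (p > last_pass[d])
--         last_pass[d] = p
--     return ok
-- ===== SOURCE B (Python) =====
-- def _valid_pass_order(perm: tuple[tuple[str, int], ...]) -> bool: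
--     """Group pass indices by dimension first, then validate each group."""
--     groups: dict[str, list[int]] = {}
--     for d, p in perm:
--         groups.setdefault(d, []).append(p)
--     return all(
--         all(a < b for a, b in zip(lst, lst[1:]))
--         for lst in groups.values()
--     )
-- ===== Notes on version B (the rewrite author's own statement) =====
-- stated objective: alternative
-- what changed: Replaces the single interleaved scan with a last-seen dict by a two-phase group-then-validate decomposition: first build a dict mapping each dimension to its pass indices in appearance order, then check each group is strictly increasing via consecutive pairs.
import Mathlib
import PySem

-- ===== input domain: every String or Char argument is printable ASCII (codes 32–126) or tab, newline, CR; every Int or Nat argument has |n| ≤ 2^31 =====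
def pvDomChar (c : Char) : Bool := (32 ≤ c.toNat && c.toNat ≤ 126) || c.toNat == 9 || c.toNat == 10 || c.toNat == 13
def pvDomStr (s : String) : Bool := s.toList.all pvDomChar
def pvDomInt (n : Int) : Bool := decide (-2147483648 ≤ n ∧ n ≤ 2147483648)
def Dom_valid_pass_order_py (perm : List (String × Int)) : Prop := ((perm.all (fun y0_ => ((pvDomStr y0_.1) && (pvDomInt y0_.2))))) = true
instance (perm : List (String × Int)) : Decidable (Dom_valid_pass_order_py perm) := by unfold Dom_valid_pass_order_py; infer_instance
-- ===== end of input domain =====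

-- B replaces A's single interleaved scan by a two-phase group-then-validate decomposition (same cost, different structure).


-- ===== PORT A =====
-- literal port of A: one scan keeping last_pass : dict and a running ok flag
def valid_pass_order_py (perm : List (String × Int)) : Bool :=
  let st := perm.foldl
    (fun (st : PySem.Dict String Int × Bool) x =>
      let ok := match st.1.get? x.1 with
        | some v => st.2 && decide (x.2 > v)
        | none => st.2
      (st.1.insert x.1 x.2, ok))
    (PySem.Dict.empty, true)
  st.2

-- ===== PORT B =====
-- phase 1: group pass indices by dimension (appearance order)
def vpoGroups (perm : List (String × Int)) : PySem.Dict String (List Int) :=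
  perm.foldl (fun d x => d.modify x.1 [] (· ++ [x.2])) PySem.Dict.empty

-- phase 2: all(a < b for a, b in zip(lst, lst[1:]))
def vpoAsc (l : List Int) : Bool :=
  (l.zip l.tail).all (fun p => decide (p.1 < p.2))

def valid_pass_order_py_alt (perm : List (String × Int)) : Bool :=
  (vpoGroups perm).values.all vpoAsc

-- ===== PRECONDITION & SPEC =====
def Spec_valid_pass_order_py (perm : List (String × Int)) (out : Bool) : Prop := out = valid_pass_order_py_alt perm
instance (perm : List (String × Int)) (out : Bool) : Decidable (Spec_valid_pass_order_py perm out) := by unfold Spec_valid_pass_order_py; infer_instance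

-- ===== CLAIM (what is proved, stated in full; the proofs are below) =====
def Claim_equal_valid_pass_order_py : Prop := ∀ (perm : List (String × Int)), Dom_valid_pass_order_py perm → Spec_valid_pass_order_py perm (valid_pass_order_py perm)

-- ===== LEMMAS AND PROOFS =====

-- chain check from an optional "last seen" value
def vpoChain : Option Int → List Int → Bool
  | _, [] => true
  | none, x :: xs => vpoChain (some x) xs
  | some v, x :: xs => decide (v < x) && vpoChain (some x) xs

-- a functional re-statement of A's scan, with an explicit environment
def vpoRec (f : String → Option Int) : List (String × Int) → Bool
  | [] => true
  | (d, p) :: rest =>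
      (match f d with | some v => decide (v < p) | none => true) &&
      vpoRec (fun k => if k = d then some p else f k) rest

def vpoGroup (perm : List (String × Int)) (k : String) : List Int :=
  (perm.filter (fun x => x.1 == k)).map (·.2)

theorem vpoA_fold (l : List (String × Int)) :
    ∀ (d : PySem.Dict String Int) (ok : Bool),
      (l.foldl
        (fun (st : PySem.Dict String Int × Bool) x =>
          let ok := match st.1.get? x.1 with
            | some v => st.2 && decide (x.2 > v)
            | none => st.2
          (st.1.insert x.1 x.2, ok))
        (d, ok)).2 = (ok && vpoRec (fun k => d.get? k) l) := by
  induction l with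
  | nil => intro d ok; simp [vpoRec]
  | cons x rest ih =>
    intro d ok
    obtain ⟨xd, xp⟩ := x
    simp only [List.foldl_cons, vpoRec]
    rw [ih]
    have hf : (fun k => (d.insert xd xp).get? k) = (fun k => if k = xd then some xp else d.get? k) := by
      funext k; exact PySem.Dict.get?_insert d xd k xp
    rw [hf]
    cases h : d.get? xd with
    | none => simp
    | some v => simp [gt_iff_lt, Bool.and_assoc]

theorem vpoGroup_cons_self (d : String) (p : Int) (rest : List (String × Int)) :
    vpoGroup ((d, p) :: rest) d = p :: vpoGroup rest d := by
  simp [vpoGroup]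

theorem vpoGroup_cons_ne (d k : String) (p : Int) (rest : List (String × Int))
    (h : k ≠ d) : vpoGroup ((d, p) :: rest) k = vpoGroup rest k := by
  simp [vpoGroup, beq_iff_eq, Ne.symm h]

theorem vpoRec_iff (l : List (String × Int)) :
    ∀ (f : String → Option Int),
      vpoRec f l = true ↔ ∀ k, vpoChain (f k) (vpoGroup l k) = true := by
  induction l with
  | nil => intro f; simp [vpoRec, vpoGroup, vpoChain]
  | cons x rest ih =>
    intro f
    obtain ⟨xd, xp⟩ := x
    simp only [vpoRec, Bool.and_eq_true, ih]
    constructor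
    · rintro ⟨h1, h2⟩ k
      by_cases hk : k = xd
      · subst hk
        rw [vpoGroup_cons_self]
        have hthis := h2 k
        rw [if_pos rfl] at hthis
        cases hfk : f k with
        | none => simpa [vpoChain] using hthis
        | some v =>
          rw [hfk] at h1
          simp only [vpoChain, Bool.and_eq_true]
          exact ⟨by simpa using h1, hthis⟩
      · rw [vpoGroup_cons_ne xd k xp rest hk]
        have hthis := h2 k
        rwa [if_neg hk] at hthis
    · intro h
      have hxd := h xd
      rw [vpoGroup_cons_self] at hxd
      constructor
      · cases hfk : f xd with
        | none => simp
        | some v =>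
          rw [hfk] at hxd
          simp only [vpoChain, Bool.and_eq_true] at hxd
          simpa using hxd.1
      · intro k
        by_cases hk : k = xd
        · subst hk
          rw [if_pos rfl]
          cases hfk : f k with
          | none => rw [hfk] at hxd; simpa [vpoChain] using hxd
          | some v =>
            rw [hfk] at hxd
            simp only [vpoChain, Bool.and_eq_true] at hxd
            exact hxd.2
        · rw [if_neg hk]
          have hthis := h k
          rwa [vpoGroup_cons_ne xd k xp rest hk] at hthis

theorem vpoChain_some (xs : List Int) :
    ∀ v, vpoChain (some v) xs = ((v :: xs).zip xs).all (fun p => decide (p.1 < p.2)) := by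
  induction xs with
  | nil => intro v; simp [vpoChain]
  | cons x xs ih => intro v; simp [vpoChain, List.zip, ih x]

theorem vpoChain_none (xs : List Int) : vpoChain none xs = vpoAsc xs := by
  cases xs with
  | nil => simp [vpoChain, vpoAsc]
  | cons x xs => simp [vpoChain, vpoAsc, vpoChain_some]

theorem vpoGroups_keys_nodup (perm : List (String × Int)) : (vpoGroups perm).keys.Nodup := by
  exact PySem.Dict.nodup_keys_foldl_modify_key perm (·.1) [] (fun d x l => l ++ [x.2]) PySem.Dict.empty PySem.Dict.nodup_keys_empty

theorem vpoGroups_getD (perm : List (String × Int)) (k : String) :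
    (vpoGroups perm).getD k [] = vpoGroup perm k := by
  unfold vpoGroups vpoGroup
  rw [PySem.Dict.getD_foldl_modify_append]
  simp

theorem vpoGroup_of_not_mem (perm : List (String × Int)) (k : String)
    (h : k ∉ (vpoGroups perm).keys) : vpoGroup perm k = [] := by
  have := vpoGroups_getD perm k
  rw [← this]
  rw [PySem.Dict.getD_of_not_contains]
  rw [← Bool.not_eq_true, PySem.Dict.contains_iff_mem_keys]
  exact h

theorem vpoAlt_iff (perm : List (String × Int)) :
    valid_pass_order_py_alt perm = true ↔ ∀ k, vpoAsc (vpoGroup perm k) = true := by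
  unfold valid_pass_order_py_alt
  rw [PySem.Dict.values_eq_map_keys (vpoGroups perm) (vpoGroups_keys_nodup perm) []]
  simp only [List.all_map, List.all_eq_true, Function.comp]
  constructor
  · intro h k
    by_cases hk : k ∈ (vpoGroups perm).keys
    · have := h k hk
      rwa [vpoGroups_getD] at this
    · rw [vpoGroup_of_not_mem perm k hk]; rfl
  · intro h k _
    rw [vpoGroups_getD]; exact h k

-- ===== VERDICT (by name: the statement is the Claim_ definition above) =====
theorem valid_pass_order_py_spec : Claim_equal_valid_pass_order_py := by
  intro perm _
  unfold Spec_valid_pass_order_py valid_pass_order_py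
  simp only []
  rw [vpoA_fold]
  rw [Bool.true_and]
  have hA : vpoRec (fun k => PySem.Dict.empty.get? k) perm = true ↔
      valid_pass_order_py_alt perm = true := by
    rw [vpoRec_iff, vpoAlt_iff]
    constructor
    · intro h k
      have := h k
      rwa [PySem.Dict.get?_empty, vpoChain_none] at this
    · intro h k
      rw [PySem.Dict.get?_empty, vpoChain_none]
      exact h k
  rw [Bool.eq_iff_iff]
  exact hA
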